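-- pv_equiv track=rewrite | github.com/icbat/adventofcode2015 | python/day5/naught_nice.py | has_xYx
-- ===== SOURCE A (Python) =====
-- def has_xYx(string):
--     last = ""
--     laster = ""
--     for character in string:
--         if character == laster:
--             return True
--         laster = last
--         last = character
--     return False
-- ===== SOURCE B (Python) =====
-- def has_xYx(string):
--     positions = {}
--     for i, c in enumerate(string):
--         positions.setdefault(c, []).append(i)
--     for ps in positions.values():
--         pos_set = set(ps)
--         if any(i + 2 in pos_set for i in ps):
--             return True
--     return False
-- ===== Notes on version B (the rewrite author's own statement) =====
-- stated objective: alternative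
-- what changed: Replaces A's rolling two-variable state machine over the char stream with an inverted index: group each character's positions into a dict in one pass, then check whether any character occurs at two positions exactly 2 apart (membership in a per-character position set).
import Mathlib
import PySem

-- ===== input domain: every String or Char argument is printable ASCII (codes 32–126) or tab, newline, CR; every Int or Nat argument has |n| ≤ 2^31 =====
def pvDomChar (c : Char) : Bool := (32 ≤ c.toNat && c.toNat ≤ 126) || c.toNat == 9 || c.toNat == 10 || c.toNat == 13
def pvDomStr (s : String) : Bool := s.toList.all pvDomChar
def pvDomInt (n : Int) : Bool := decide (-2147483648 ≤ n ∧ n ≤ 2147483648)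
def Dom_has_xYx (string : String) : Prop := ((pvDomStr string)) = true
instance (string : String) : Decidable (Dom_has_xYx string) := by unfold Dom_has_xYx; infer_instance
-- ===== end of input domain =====

-- B replaces A's rolling last/laster state machine with an inverted index: one pass
-- groups each character's positions into a dict, then B checks whether some character
-- occurs at two positions exactly 2 apart (alternative algorithm, same asymptotic cost).

-- ===== PORT A =====
-- A's `last`/`laster` start as "" (never equal to a 1-char string), then hold one
-- character each; modelled exactly by Option Char, none = "".
def hasXYxLoopA : List Char → Option Char → Option Char → Bool
  | [], _, _ => false
  | c :: rest, last, laster =>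
      if some c = laster then true else hasXYxLoopA rest (some c) last

def has_xYx (string : String) : Bool :=
  hasXYxLoopA string.toList none none

-- ===== PORT B =====
-- positions = {}
-- for i, c in enumerate(string): positions.setdefault(c, []).append(i)
-- for ps in positions.values():
--     pos_set = set(ps)
--     if any(i + 2 in pos_set for i in ps): return True
-- return False
def has_xYx_alt (string : String) : Bool :=
  let positions : PySem.Dict Char (List Int) :=
    (PySem.List.enumerate string.toList 0).foldl
      (fun d p => d.modify p.2 [] (fun ps => ps ++ [p.1])) PySem.Dict.empty
  positions.values.any (fun ps =>
    let posSet : PySem.Set Int := PySem.Set.ofList ps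
    ps.any (fun i => posSet.contains (i + 2)))

-- ===== PRECONDITION & SPEC =====
def Spec_has_xYx (string : String) (out : Bool) : Prop := out = has_xYx_alt string
instance (string : String) (out : Bool) : Decidable (Spec_has_xYx string out) := by unfold Spec_has_xYx; infer_instance

-- ===== CLAIM =====
def Claim_equal_has_xYx : Prop := ∀ (string : String), Dom_has_xYx string → Spec_has_xYx string (has_xYx string)

-- ===== LEMMAS AND PROOFS =====
-- The common characterisation: some index k has l[k] = l[k+2].
def XYxProp (l : List Char) : Prop :=
  ∃ k : Nat, ∃ _ : k + 2 < l.length, l[k] = l[k + 2]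

-- A's loop with filled state (last = y, laster = x) scans (x :: y :: l) against l,
-- i.e. compares each char with the one two positions earlier.
lemma hasXYxLoopA_zip (l : List Char) : ∀ (x y : Char),
    hasXYxLoopA l (some y) (some x)
      = ((x :: y :: l).zip l).any (fun p => p.1 == p.2) := by
  induction l with
  | nil => intro x y; simp [hasXYxLoopA]
  | cons c rest ih =>
      intro x y
      simp only [hasXYxLoopA, List.zip, List.zipWith, List.any_cons]
      by_cases h : c = x
      · simp [h]
      · have : (some c = some x) = False := by simp [h]
        simp [this, ih y c, List.zip, Ne.symm h]

lemma zip_iff (l : List Char) :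
    (l.zip (l.drop 2)).any (fun p => p.1 == p.2) = true ↔ XYxProp l := by
  rw [List.any_eq_true]
  constructor
  · rintro ⟨p, hp, he⟩
    obtain ⟨k, hk, hpe⟩ := List.getElem_of_mem hp
    rw [List.getElem_zip] at hpe
    simp at hk
    refine ⟨k, by omega, ?_⟩
    have h2 : l[k + 2]'(by omega) = (l.drop 2)[k]'(by simp; omega) := by
      simp [List.getElem_drop]; congr 1; omega
    have he' : p.1 = p.2 := by simpa using he
    rw [← hpe] at he'
    simp at he'
    convert he' using 2
    omega
  · rintro ⟨k, hk, he⟩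
    refine ⟨(l[k]'(by omega), (l.drop 2)[k]'(by simp; omega)), ?_, ?_⟩
    · rw [← List.getElem_zip (h := by simp; omega)]
      exact List.getElem_mem _
    · simp [List.getElem_drop]
      convert he using 2
      omega

lemma a_iff (s : String) : has_xYx s = true ↔ XYxProp s.toList := by
  unfold has_xYx
  rw [← zip_iff]
  match hl : s.toList with
  | [] => simp [hasXYxLoopA]
  | [c] => simp [hasXYxLoopA]
  | c1 :: c2 :: rest =>
      simp only [hasXYxLoopA, List.drop]
      have h1 : (some c1 = (none : Option Char)) = False := by simp
      have h2 : (some c2 = (none : Option Char)) = False := by simp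
      simp [h1, h2, hasXYxLoopA_zip rest c1 c2]

lemma b_iff (s : String) : has_xYx_alt s = true ↔ XYxProp s.toList := by
  set l := s.toList with hl
  set e := PySem.List.enumerate l 0 with he
  unfold has_xYx_alt
  rw [← hl, ← he]
  have hfold : e.foldl (fun d p => d.modify p.2 [] (fun ps => ps ++ [p.1])) PySem.Dict.empty
      = (e.map (fun p => (p.2, p.1))).foldl (fun d q => d.modify q.1 [] (fun ps => ps ++ [q.2])) PySem.Dict.empty := by
    rw [List.foldl_map]
  set E := e.map (fun p => (p.2, p.1)) with hE
  set D := E.foldl (fun d q => d.modify q.1 [] (fun ps => ps ++ [q.2])) PySem.Dict.empty with hD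
  have hnodup : D.keys.Nodup := by
    rw [hD]
    exact PySem.Dict.nodup_keys_foldl_modify_key E Prod.fst [] _ PySem.Dict.empty (by simp)
  have hgetD : ∀ c, D.getD c [] = (E.filter (fun q => q.1 == c)).map (·.2) := by
    intro c
    rw [hD, PySem.Dict.getD_foldl_modify_append]
    simp [PySem.Dict.getD_empty]
  have hkeys : D.keys = PySem.Set.ofList (E.map (·.1)) := by
    rw [hD, PySem.Dict.keys_foldl_modify_key]
    simp [PySem.Dict.keys_empty]
    rfl
  have hvals : D.values = D.keys.map (fun c => D.getD c []) :=
    PySem.Dict.values_eq_map_keys D hnodup []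
  have hfst : E.map (·.1) = l := by
    rw [hE, List.map_map]
    exact PySem.List.map_snd_enumerate l 0
  have hmemS : ∀ (c : Char) (i : Int), (i ∈ (E.filter (fun q => q.1 == c)).map (·.2)) ↔ (i, c) ∈ e := by
    intro c i
    simp only [hE, List.mem_map, List.mem_filter]
    constructor
    · rintro ⟨q, ⟨⟨p, hp, rfl⟩, hq⟩, rfl⟩
      simp at hq ⊢
      rwa [← hq]
    · intro h
      exact ⟨(c, i), ⟨⟨(i, c), h, rfl⟩, by simp⟩, rfl⟩
  rw [hfold]
  change (D.values.any fun ps => ps.any fun i => (PySem.Set.ofList ps).contains (i + 2)) = true ↔ XYxProp l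
  rw [hvals, hkeys, hfst]
  simp only [List.any_eq_true, List.mem_map, PySem.Set.mem_ofList]
  constructor
  · rintro ⟨ps, ⟨c, hc, rfl⟩, i, hi, hcont⟩
    rw [hgetD] at hi hcont
    have h1 : (i, c) ∈ e := (hmemS c i).1 hi
    have h2 : (i + 2, c) ∈ e := by
      refine (hmemS c (i + 2)).1 ?_
      simpa only [PySem.Set.contains, List.contains_eq_mem, PySem.Set.mem_ofList, decide_eq_true_eq] using hcont
    rw [he, PySem.List.mem_enumerate_iff] at h1 h2
    obtain ⟨k1, hk1, hpe1⟩ := h1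
    obtain ⟨k2, hk2, hpe2⟩ := h2
    simp at hpe1 hpe2
    have hk : k2 = k1 + 2 := by omega
    subst hk
    exact ⟨k1, by omega, hpe1.2.symm.trans hpe2.2⟩
  · rintro ⟨k, hk, hke⟩
    refine ⟨D.getD l[k] [], ⟨l[k], List.getElem_mem _, rfl⟩, (k : Int), ?_, ?_⟩
    · rw [hgetD, hmemS, he, PySem.List.mem_enumerate_iff]
      exact ⟨k, by omega, by simp⟩
    · rw [hgetD]
      simp only [PySem.Set.contains, List.contains_eq_mem, PySem.Set.mem_ofList, decide_eq_true_eq]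
      rw [hmemS, he, PySem.List.mem_enumerate_iff]
      refine ⟨k + 2, hk, ?_⟩
      simp only [Prod.mk.injEq]
      refine ⟨by push_cast; omega, hke⟩

-- ===== VERDICT =====
theorem has_xYx_spec : Claim_equal_has_xYx := by
  intro s _
  unfold Spec_has_xYx
  rw [Bool.eq_iff_iff, a_iff, b_iff]
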